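-- pv_equiv track=rewrite | github.com/sdeleers/wikipedia_suffix_array | src/suffix_array/longest_repeated_substring.py | calculateLVP
-- ===== SOURCE A (Python) =====
-- def calculateLVP(text):
--   valid = 256 * [False]
--   for i in range(len(valid)):
--     c = chr(i)
--     if (c.isalnum()): valid[i] = True
--     if (c == '.'): valid[i] = True
--     if (c == '!'): valid[i] = True
--     if (c == ' '): valid[i] = True
--     if (c == '('): valid[i] = True
--     if (c == ')'): valid[i] = True
--     if (c == '-'): valid[i] = True
--     if (c == ','): valid[i] = True
--     if (c == ';'): valid[i] = True
--     if (c == '\''): valid[i] = True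
--
--   # Calculate LVP (DP).
--   N = len(text)
--   lvp = N * [0]
--   for i in range(N - 1, -1, -1):
--     char_ord = ord(text[i])
--     if char_ord >= 0 and char_ord < 256 and valid[char_ord]:
--       if i == N - 1:
--         lvp[i] = 1
--       else:
--         lvp[i] = lvp[i + 1] + 1
--   return lvp
-- ===== SOURCE B (Python) =====
-- def calculateLVP(text):
--   # Build the validity alphabet once as a set (chr(0..255) only, so chars with
--   # ord >= 256 stay invalid, as in the original).
--   valid = set()
--   for i in range(256):
--     c = chr(i)
--     if c.isalnum() or c in ".! (),-;'":
--       valid.add(c)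
--   # Forward two-pointer pass: group maximal valid runs and emit run, run-1, ..., 1.
--   n = len(text)
--   lvp = []
--   i = 0
--   while i < n:
--     if text[i] in valid:
--       j = i
--       while j < n and text[j] in valid:
--         j += 1
--       lvp.extend(range(j - i, 0, -1))
--       i = j
--     else:
--       lvp.append(0)
--       i += 1
--   return lvp
-- ===== Notes on version B (the rewrite author's own statement) =====
-- stated objective: alternative
-- what changed: Replaced A's backward index-by-index DP (lvp[i] = lvp[i+1]+1) over a 256-entry boolean table with a forward two-pointer pass that groups each maximal run of valid characters (valid = a set built once from chr(0..255)) and emits run, run-1, ..., 1 at once.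
import Mathlib
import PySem

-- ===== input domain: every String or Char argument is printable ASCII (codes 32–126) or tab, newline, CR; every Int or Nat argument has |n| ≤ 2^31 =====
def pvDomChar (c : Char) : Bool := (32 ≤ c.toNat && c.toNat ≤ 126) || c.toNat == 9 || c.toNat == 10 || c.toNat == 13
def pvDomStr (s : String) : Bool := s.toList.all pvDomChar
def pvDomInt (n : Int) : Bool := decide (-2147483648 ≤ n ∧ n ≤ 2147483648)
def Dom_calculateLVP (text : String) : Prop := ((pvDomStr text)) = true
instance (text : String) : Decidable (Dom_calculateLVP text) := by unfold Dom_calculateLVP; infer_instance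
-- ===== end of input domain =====

-- B replaces A's backward DP recurrence by a forward two-pointer run-grouping pass
-- over a validity set built once from chr(0..255); same output, different decomposition.

-- ===== PORT A =====
-- for i in range(256): the ten sequential if-statements marking valid[i]
def pvValidStep (valid : List Bool) (i : Int) : List Bool :=
  let c := Char.ofNat i.toNat   -- chr(i)
  let valid := if PySem.Chars.isalnum c then PySem.List.pySetD valid i true else valid
  let valid := if c = '.' then PySem.List.pySetD valid i true else valid
  let valid := if c = '!' then PySem.List.pySetD valid i true else valid
  let valid := if c = ' ' then PySem.List.pySetD valid i true else valid
  let valid := if c = '(' then PySem.List.pySetD valid i true else valid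
  let valid := if c = ')' then PySem.List.pySetD valid i true else valid
  let valid := if c = '-' then PySem.List.pySetD valid i true else valid
  let valid := if c = ',' then PySem.List.pySetD valid i true else valid
  let valid := if c = ';' then PySem.List.pySetD valid i true else valid
  let valid := if c = '\'' then PySem.List.pySetD valid i true else valid
  valid

def pvValidA : List Bool :=
  (PySem.List.pyRange 0 256 1).foldl pvValidStep (List.replicate 256 false)

-- body of 'for i in range(N-1, -1, -1)': indices i and i+1 are in range along the loop,
-- and valid[char_ord] is guarded by char_ord < 256, so the total getD/setD forms are exact here
def pvLoopBodyA (chars : List Char) (N : Int) (lvp : List Int) (i : Int) : List Int :=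
  let char_ord : Int := ((PySem.List.pyGetD chars i ' ').toNat : Int)   -- ord(text[i])
  if 0 ≤ char_ord && char_ord < 256 && PySem.List.pyGetD pvValidA char_ord false then
    if i == N - 1 then PySem.List.pySetD lvp i 1
    else PySem.List.pySetD lvp i (PySem.List.pyGetD lvp (i + 1) 0 + 1)
  else lvp

-- N = len(text); lvp starts as N * [0]
def calculateLVP (text : String) : List Int :=
  (PySem.List.pyRange (PySem.Str.len text - 1) (-1) (-1)).foldl
    (pvLoopBodyA text.toList (PySem.Str.len text))
    (List.replicate (PySem.Str.len text).toNat 0)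

-- ===== PORT B =====
-- valid = set(); for i in range(256): add chr(i) if alnum or in ".! (),-;'"
def pvValidB : PySem.Set Char :=
  (PySem.List.pyRange 0 256 1).foldl (fun s i =>
    let c := Char.ofNat i.toNat
    if PySem.Chars.isalnum c || PySem.Chars.isIn [c] ".! (),-;'".toList then PySem.Set.add s c else s)
    PySem.Set.empty

-- inner 'while j < n and text[j] in valid': length of the maximal leading valid run
def pvRunLen (s : PySem.Set Char) : List Char → Nat
  | [] => 0
  | c :: rest => if PySem.Set.contains s c then pvRunLen s rest + 1 else 0

-- outer 'while i < n' loop: group a maximal run, emit range(run, 0, -1), jump past it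
def pvGoB (s : PySem.Set Char) : List Char → List Int
  | [] => []
  | c :: rest =>
    if PySem.Set.contains s c then
      let run : Nat := pvRunLen s rest + 1
      PySem.List.pyRange (run : Int) 0 (-1) ++ pvGoB s (rest.drop (pvRunLen s rest))
    else 0 :: pvGoB s rest
termination_by l => l.length
decreasing_by all_goals simp

def calculateLVP_alt (text : String) : List Int := pvGoB pvValidB text.toList

-- ===== PRECONDITION & SPEC =====
def Spec_calculateLVP (text : String) (out : List Int) : Prop := out = calculateLVP_alt text
instance (text : String) (out : List Int) : Decidable (Spec_calculateLVP text out) := by unfold Spec_calculateLVP; infer_instance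

-- ===== CLAIM (what is proved, stated in full; the proofs are below) =====
def Claim_equal_calculateLVP : Prop := ∀ (text : String), Dom_calculateLVP text → Spec_calculateLVP text (calculateLVP text)

-- ===== LEMMAS AND PROOFS =====

-- the per-character validity test A's guard performs
def pvVA (c : Char) : Bool :=
  0 ≤ ((c.toNat : Int)) && ((c.toNat : Int)) < 256 && PySem.List.pyGetD pvValidA ((c.toNat : Int)) false

-- reference backward recurrence: out[i] = (valid c) ? out[i+1]+1 : 0
def pvSpecF (v : Char → Bool) : List Char → List Int
  | [] => []
  | c :: rest =>
    let r := pvSpecF v rest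
    (if v c then r.head?.getD 0 + 1 else 0) :: r

-- leading count of valid characters
def pvLead (v : Char → Bool) : List Char → Nat
  | [] => 0
  | c :: rest => if v c then pvLead v rest + 1 else 0

theorem pvRunLen_eq (s : PySem.Set Char) (l : List Char) :
    pvRunLen s l = pvLead (fun c => PySem.Set.contains s c) l := by
  induction l with
  | nil => rfl
  | cons c rest ih => simp [pvRunLen, pvLead, ih]

theorem pvSpecF_congr (v w : Char → Bool) (l : List Char)
    (h : ∀ c ∈ l, v c = w c) : pvSpecF v l = pvSpecF w l := by
  induction l with
  | nil => rfl
  | cons c rest ih =>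
    simp only [pvSpecF, ih (fun x hx => h x (List.mem_cons_of_mem _ hx)), h c List.mem_cons_self]

-- the head of the backward recurrence is the leading-run length
theorem pvHeadD (v : Char → Bool) (l : List Char) :
    (pvSpecF v l).head?.getD 0 = ((pvLead v l : Nat) : Int) := by
  induction l with
  | nil => rfl
  | cons c rest ih =>
    by_cases hv : v c = true
    · simp [pvSpecF, pvLead, hv, ih]
    · have hv' : v c = false := by simpa using hv
      simp [pvSpecF, pvLead, hv']

theorem pvDescend_cons (k : Nat) :
    PySem.List.pyRange ((k : Int) + 1) 0 (-1) = ((k : Int) + 1) :: PySem.List.pyRange (k : Int) 0 (-1) := by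
  rw [PySem.List.pyRange_neg_one_cons (by omega)]
  simp

-- the run decomposition of the backward recurrence
theorem pvSpecF_lead (v : Char → Bool) (l : List Char) :
    pvSpecF v l = PySem.List.pyRange ((pvLead v l : Nat) : Int) 0 (-1) ++ pvSpecF v (l.drop (pvLead v l)) := by
  induction l with
  | nil => simp [pvSpecF, pvLead, PySem.List.pyRange_neg_one_eq_nil]
  | cons c rest ih =>
    by_cases hv : v c = true
    · have hlead : pvLead v (c :: rest) = pvLead v rest + 1 := by simp [pvLead, hv]
      rw [hlead]
      have hcast : (((pvLead v rest + 1 : Nat)) : Int) = ((pvLead v rest : Nat) : Int) + 1 := by push_cast; ring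
      rw [hcast, pvDescend_cons]
      have hdrop : (c :: rest).drop (pvLead v rest + 1) = rest.drop (pvLead v rest) := by simp
      rw [hdrop]
      have hcons : pvSpecF v (c :: rest) = (((pvLead v rest : Nat) : Int) + 1) :: pvSpecF v rest := by
        simp [pvSpecF, hv, pvHeadD]
      rw [hcons, ih]
      simp
    · have hv' : v c = false := by simpa using hv
      simp [pvSpecF, pvLead, hv', PySem.List.pyRange_neg_one_eq_nil]

theorem pvGoB_eq (s : PySem.Set Char) (l : List Char) :
    pvGoB s l = pvSpecF (fun c => PySem.Set.contains s c) l := by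
  induction l using pvGoB.induct s with
  | case1 => simp [pvGoB, pvSpecF]
  | case2 c rest hmem ih =>
    rw [pvGoB, if_pos hmem, ih]
    rw [pvSpecF_lead (fun c => PySem.Set.contains s c) (c :: rest)]
    have hlead : pvLead (fun c => PySem.Set.contains s c) (c :: rest)
        = pvRunLen s rest + 1 := by
      simp only [pvLead]
      rw [if_pos hmem, pvRunLen_eq]
    rw [hlead]
    simp only [List.drop_succ_cons]
  | case3 c rest hmem ih =>
    rw [pvGoB, if_neg hmem]
    simp only [pvSpecF]
    rw [if_neg hmem, ih]

-- one step of A's backward loop preserves the invariant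
theorem pvStepA_inv (chars : List Char) (m : Nat) (hm : m < chars.length)
    (lvp : List Int)
    (hlvp : lvp = List.replicate (m + 1) 0 ++ pvSpecF pvVA (chars.drop (m + 1))) :
    pvLoopBodyA chars (chars.length : Int) lvp (m : Int)
      = List.replicate m 0 ++ pvSpecF pvVA (chars.drop m) := by
  have hdrop : chars.drop m = chars[m] :: chars.drop (m + 1) := List.drop_eq_getElem_cons hm
  have hget : PySem.List.pyGetD chars (m : Int) ' ' = chars[m] := by
    rw [PySem.List.pyGetD_natCast, List.getD_eq_getElem _ _ hm]
  unfold pvLoopBodyA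
  rw [hget]
  by_cases hv : pvVA chars[m] = true
  · have hcond : (0 ≤ ((chars[m].toNat : Int)) && ((chars[m].toNat : Int)) < 256 &&
        PySem.List.pyGetD pvValidA ((chars[m].toNat : Int)) false) = true := hv
    simp only [hcond, if_pos]
    have hS : PySem.List.pyGetD lvp ((m : Int) + 1) 0
        = (pvSpecF pvVA (chars.drop (m + 1))).head?.getD 0 := by
      have hc : ((m : Int) + 1) = (((m + 1 : Nat)) : Int) := by push_cast; ring
      rw [hc, PySem.List.pyGetD_natCast, hlvp,
        List.getD_append_right _ _ _ _ (by simp)]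
      simp only [List.length_replicate, Nat.sub_self]
      cases pvSpecF pvVA (chars.drop (m + 1)) <;> simp
    have hset : ∀ w : Int, PySem.List.pySetD lvp (m : Int) w
        = List.replicate m 0 ++ (w :: pvSpecF pvVA (chars.drop (m + 1))) := by
      intro w
      rw [PySem.List.pySetD_natCast, hlvp]
      have hrep : List.replicate (m + 1) (0 : Int) = List.replicate m 0 ++ [0] := by
        simp [List.replicate_succ']
      rw [hrep, List.append_assoc, List.set_append_right _ _ (by simp)]
      simp
    by_cases hlast : m = chars.length - 1
    · have hend : chars.drop (m + 1) = [] := by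
        apply List.drop_eq_nil_of_le; omega
      have hbeq : ((m : Int) == (chars.length : Int) - 1) = true := by
        simp; omega
      rw [hbeq]
      simp only [if_pos]
      rw [hset 1, hdrop]
      simp [pvSpecF, hend, hv]
    · have hbeq : ((m : Int) == (chars.length : Int) - 1) = false := by
        simp; omega
      rw [hbeq]
      simp only [Bool.false_eq_true, if_false]
      rw [hset _, hS, hdrop]
      simp [pvSpecF, hv]
  · have hcond : (0 ≤ ((chars[m].toNat : Int)) && ((chars[m].toNat : Int)) < 256 &&
        PySem.List.pyGetD pvValidA ((chars[m].toNat : Int)) false) = false := by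
      have hv' : pvVA chars[m] = false := by simpa using hv
      exact hv'
    simp only [hcond, Bool.false_eq_true, if_false]
    rw [hlvp, hdrop]
    have hv' : pvVA chars[m] = false := by simpa using hv
    simp [pvSpecF, hv', List.replicate_succ']

-- A's loop, run from index m-1 down to 0, completes the invariant to the full spec
theorem pvLoopA (chars : List Char) (m : Nat) (hm : m ≤ chars.length)
    (lvp : List Int)
    (hlvp : lvp = List.replicate m 0 ++ pvSpecF pvVA (chars.drop m)) :
    (PySem.List.pyRange ((m : Int) - 1) (-1) (-1)).foldl (pvLoopBodyA chars (chars.length : Int)) lvp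
      = pvSpecF pvVA chars := by
  induction m generalizing lvp with
  | zero =>
    rw [PySem.List.pyRange_neg_one_eq_nil (by omega)]
    simpa using hlvp
  | succ k ih =>
    have hc : ((k + 1 : Nat) : Int) - 1 = ((k : Nat) : Int) := by push_cast; ring
    rw [hc, PySem.List.pyRange_neg_one_cons (by omega), List.foldl_cons]
    exact ih (by omega) _ (pvStepA_inv chars k (by omega) lvp hlvp)

set_option maxRecDepth 10000 in
theorem pvAgree128 : ∀ n : Nat, n < 128 → pvVA (Char.ofNat n) = PySem.Set.contains pvValidB (Char.ofNat n) := by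
  decide

theorem pvAgree (c : Char) (h : pvDomChar c = true) :
    pvVA c = PySem.Set.contains pvValidB c := by
  have hlt : c.toNat < 128 := by
    simp only [pvDomChar, Bool.or_eq_true, Bool.and_eq_true, decide_eq_true_eq,
      beq_iff_eq] at h
    rcases h with ((⟨h1, h2⟩ | h) | h) | h <;> omega
  have h128 := pvAgree128 c.toNat hlt
  rwa [Char.ofNat_toNat] at h128

-- ===== VERDICT (by name: the statement is the Claim_ definition above) =====
theorem calculateLVP_spec : Claim_equal_calculateLVP := by
  intro text hdom
  unfold Spec_calculateLVP calculateLVP calculateLVP_alt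
  have hN : (PySem.Str.len text) = (text.toList.length : Int) := by
    simp [PySem.Str.len_eq]
  rw [hN]
  have hNt : ((text.toList.length : Int)).toNat = text.toList.length := by omega
  rw [hNt]
  rw [pvLoopA text.toList text.toList.length le_rfl _
    (by rw [List.drop_length]; simp [pvSpecF])]
  rw [pvGoB_eq]
  apply pvSpecF_congr
  intro c hc
  apply pvAgree
  have hall : ∀ x ∈ text.toList, pvDomChar x = true := by
    simpa [Dom_calculateLVP, pvDomStr, List.all_eq_true] using hdom
  exact hall c hc
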